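-- pv_equiv track=rewrite | github.com/hackinmonster/shadow-stories | main.py | _detect_jump
-- ===== SOURCE A (Python) =====
-- JUMP_THRESH = 26
--
-- JUMP_MIN_PHASE_FRAMES = 3
--
-- JUMP_MIN_SWING = 55
--
-- def _detect_jump(vels: list[tuple[int, int]]) -> bool:
--     if len(vels) < 8:
--         return False
--     up_idxs = [i for i, (_, dy) in enumerate(vels) if dy < -JUMP_THRESH]
--     down_idxs = [i for i, (_, dy) in enumerate(vels) if dy > JUMP_THRESH]
--     if len(up_idxs) < JUMP_MIN_PHASE_FRAMES or len(down_idxs) < JUMP_MIN_PHASE_FRAMES: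
--         return False
--     first_up = up_idxs[0]
--     first_down_after_up = next((i for i in down_idxs if i > first_up), None)
--     if first_down_after_up is None:
--         return False
--
--     up_before_down = sum(1 for i in up_idxs if i < first_down_after_up)
--     down_after_up = sum(1 for i in down_idxs if i > first_up)
--     if up_before_down < 2 or down_after_up < JUMP_MIN_PHASE_FRAMES:
--         return False
--
--     ys = [dy for _, dy in vels]
--     swing = max(ys) - min(ys)
--     if swing < JUMP_MIN_SWING:
--         return False
--     return True
-- ===== SOURCE B (Python) =====
-- JUMP_THRESH = 26
--
-- JUMP_MIN_PHASE_FRAMES = 3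
--
-- JUMP_MIN_SWING = 55
--
-- def _detect_jump(vels: list[tuple[int, int]]) -> bool:
--     if len(vels) < 8:
--         return False
--     up_count = 0
--     down_count = 0
--     first_up_seen = False
--     first_down_after_up_seen = False
--     up_before_down = 0
--     down_after_up = 0
--     max_y = vels[0][1]
--     min_y = vels[0][1]
--     for _, dy in vels:
--         if dy > max_y:
--             max_y = dy
--         if dy < min_y:
--             min_y = dy
--         if dy < -JUMP_THRESH:
--             up_count += 1
--             first_up_seen = True
--             if not first_down_after_up_seen:
--                 up_before_down += 1
--         elif dy > JUMP_THRESH: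
--             down_count += 1
--             if first_up_seen:
--                 down_after_up += 1
--                 first_down_after_up_seen = True
--     return (up_count >= JUMP_MIN_PHASE_FRAMES
--             and down_count >= JUMP_MIN_PHASE_FRAMES
--             and first_down_after_up_seen
--             and up_before_down >= 2
--             and down_after_up >= JUMP_MIN_PHASE_FRAMES
--             and max_y - min_y >= JUMP_MIN_SWING)
-- ===== Notes on version B (the rewrite author's own statement) =====
-- stated objective: simpler
-- what changed: A builds two index lists via enumerate comprehensions and then makes several more passes (next-scan, two 1-count sums, max/min over a projected list); B makes a single pass over the velocities maintaining up/down counters, two phase flags and running max/min, with no index lists at all.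
import Mathlib
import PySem

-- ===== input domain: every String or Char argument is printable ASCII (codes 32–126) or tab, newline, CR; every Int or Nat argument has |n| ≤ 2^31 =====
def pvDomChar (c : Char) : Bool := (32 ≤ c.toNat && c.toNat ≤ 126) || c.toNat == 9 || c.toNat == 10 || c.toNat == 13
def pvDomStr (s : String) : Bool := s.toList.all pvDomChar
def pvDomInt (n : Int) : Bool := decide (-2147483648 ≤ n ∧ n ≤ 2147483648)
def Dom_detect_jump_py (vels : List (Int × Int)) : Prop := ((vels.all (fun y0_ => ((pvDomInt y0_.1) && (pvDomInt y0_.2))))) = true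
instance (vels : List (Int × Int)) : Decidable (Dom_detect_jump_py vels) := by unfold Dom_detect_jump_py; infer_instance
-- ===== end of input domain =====

-- B replaces A's index-list comprehensions and repeated passes by a single fold that maintains counters, phase flags and running extrema (objective: simpler one-pass decomposition, same O(n) cost).

-- ===== PORT A =====
-- A-side helpers: the two index-list comprehensions over enumerate(vels)
def upIdxs (l : List (Int × Int)) : List Int :=
  (PySem.List.enumerate l 0).filterMap (fun p => if p.2.2 < -26 then some p.1 else none)

def downIdxs (l : List (Int × Int)) : List Int :=
  (PySem.List.enumerate l 0).filterMap (fun p => if p.2.2 > 26 then some p.1 else none)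

def detect_jump_py (vels : List (Int × Int)) : Bool :=
  if vels.length < 8 then false
  else
    let up_idxs := upIdxs vels
    let down_idxs := downIdxs vels
    if up_idxs.length < 3 || down_idxs.length < 3 then false
    else
      match up_idxs.head? with
      | none => false
      | some first_up =>
        match down_idxs.find? (fun i => decide (i > first_up)) with
        | none => false
        | some first_down_after_up =>
          let up_before_down := up_idxs.countP (fun i => decide (i < first_down_after_up))
          let down_after_up := down_idxs.countP (fun i => decide (i > first_up))
          if up_before_down < 2 || down_after_up < 3 then false
          else
            let ys := vels.map (·.2)
            match PySem.List.max? ys (fun y => y), PySem.List.min? ys (fun y => y) with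
            | some mx, some mn => if mx - mn < 55 then false else true
            | _, _ => false

-- ===== PORT B =====
structure JState where
  uc : Nat
  dc : Nat
  fu : Bool
  fd : Bool
  ubd : Nat
  dau : Nat
  mx : Int
  mn : Int
deriving Repr, DecidableEq

def jstep (s : JState) (v : Int × Int) : JState :=
  let mx := if v.2 > s.mx then v.2 else s.mx
  let mn := if v.2 < s.mn then v.2 else s.mn
  if v.2 < -26 then
    { s with uc := s.uc + 1, fu := true,
             ubd := if !s.fd then s.ubd + 1 else s.ubd, mx := mx, mn := mn }
  else if v.2 > 26 then
    if s.fu then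
      { s with dc := s.dc + 1, dau := s.dau + 1, fd := true, mx := mx, mn := mn }
    else
      { s with dc := s.dc + 1, mx := mx, mn := mn }
  else
    { s with mx := mx, mn := mn }

def detect_jump_py_alt (vels : List (Int × Int)) : Bool :=
  if vels.length < 8 then false
  else
    match vels with
    | [] => false
    | v0 :: _ =>
      let s := vels.foldl jstep ⟨0, 0, false, false, 0, 0, v0.2, v0.2⟩
      decide (3 ≤ s.uc) && decide (3 ≤ s.dc) && s.fd &&
      decide (2 ≤ s.ubd) && decide (3 ≤ s.dau) && decide (55 ≤ s.mx - s.mn)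

-- ===== PRECONDITION & SPEC =====
def Spec_detect_jump_py (vels : List (Int × Int)) (out : Bool) : Prop := out = detect_jump_py_alt vels
instance (vels : List (Int × Int)) (out : Bool) : Decidable (Spec_detect_jump_py vels out) := by unfold Spec_detect_jump_py; infer_instance

-- ===== CLAIM (what is proved, stated in full; the proofs are below) =====
def Claim_equal_detect_jump_py : Prop := ∀ (vels : List (Int × Int)), Dom_detect_jump_py vels → Spec_detect_jump_py vels (detect_jump_py vels)

-- ===== LEMMAS AND PROOFS =====
-- closed-form value of each component of B's fold state, in A's vocabulary
def specFd (l : List (Int × Int)) : Bool :=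
  match (upIdxs l).head? with
  | none => false
  | some fu => ((downIdxs l).find? (fun i => decide (i > fu))).isSome

def specUbd (l : List (Int × Int)) : Nat :=
  match (upIdxs l).head? with
  | none => (upIdxs l).length
  | some fu =>
    match (downIdxs l).find? (fun i => decide (i > fu)) with
    | none => (upIdxs l).length
    | some fdau => (upIdxs l).countP (fun i => decide (i < fdau))

def specDau (l : List (Int × Int)) : Nat :=
  match (upIdxs l).head? with
  | none => 0
  | some fu => (downIdxs l).countP (fun i => decide (i > fu))

lemma upIdxs_append (l : List (Int × Int)) (x : Int × Int) :
    upIdxs (l ++ [x]) = upIdxs l ++ (if x.2 < -26 then [(l.length : Int)] else []) := by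
  unfold upIdxs
  rw [PySem.List.enumerate_append, List.filterMap_append]
  simp [PySem.List.enumerate_cons, PySem.List.enumerate_nil]
  split_ifs with h <;> simp [List.filterMap, h]

lemma downIdxs_append (l : List (Int × Int)) (x : Int × Int) :
    downIdxs (l ++ [x]) = downIdxs l ++ (if x.2 > 26 then [(l.length : Int)] else []) := by
  unfold downIdxs
  rw [PySem.List.enumerate_append, List.filterMap_append]
  simp [PySem.List.enumerate_cons, PySem.List.enumerate_nil]
  split_ifs with h <;> simp [List.filterMap, h]

lemma mem_upIdxs_bounds {l : List (Int × Int)} {i : Int} (h : i ∈ upIdxs l) :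
    0 ≤ i ∧ i < (l.length : Int) := by
  unfold upIdxs at h
  rw [List.mem_filterMap] at h
  obtain ⟨p, hp, hip⟩ := h
  rw [PySem.List.mem_enumerate_iff] at hp
  obtain ⟨k, hk, rfl⟩ := hp
  split at hip
  · cases hip; constructor <;> omega
  · cases hip

lemma mem_downIdxs_bounds {l : List (Int × Int)} {i : Int} (h : i ∈ downIdxs l) :
    0 ≤ i ∧ i < (l.length : Int) := by
  unfold downIdxs at h
  rw [List.mem_filterMap] at h
  obtain ⟨p, hp, hip⟩ := h
  rw [PySem.List.mem_enumerate_iff] at hp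
  obtain ⟨k, hk, rfl⟩ := hp
  split at hip
  · cases hip; constructor <;> omega
  · cases hip

lemma ite_max (a b : Int) : (if a < b then b else a) = max a b := by
  rw [max_def]; split_ifs <;> omega

lemma ite_min (a b : Int) : (if b < a then b else a) = min a b := by
  rw [min_def]; split_ifs <;> omega

lemma jfold_spec (v0 : Int × Int) (r : List (Int × Int)) :
    (v0 :: r).foldl jstep ⟨0, 0, false, false, 0, 0, v0.2, v0.2⟩ =
      ⟨(upIdxs (v0 :: r)).length, (downIdxs (v0 :: r)).length,
       !(upIdxs (v0 :: r)).isEmpty, specFd (v0 :: r), specUbd (v0 :: r), specDau (v0 :: r),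
       ((v0 :: r).map (·.2)).foldl max v0.2, ((v0 :: r).map (·.2)).foldl min v0.2⟩ := by
  induction r using List.reverseRecOn with
  | nil =>
      simp only [List.map, List.foldl_cons, List.foldl_nil]
      unfold jstep specFd specUbd specDau upIdxs downIdxs
      simp [PySem.List.enumerate_cons, PySem.List.enumerate_nil, List.filterMap]
      split_ifs <;> simp_all <;> omega
  | append_singleton r' x ih =>
      have hl : v0 :: (r' ++ [x]) = (v0 :: r') ++ [x] := rfl
      rw [hl, List.foldl_append, ih]
      have hU := fun i h => (mem_upIdxs_bounds (l := v0 :: r') (i := i) h).2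
      have hD := fun i h => (mem_downIdxs_bounds (l := v0 :: r') (i := i) h).2
      have hup : upIdxs (v0 :: r' ++ [x]) =
          upIdxs (v0 :: r') ++ (if x.2 < -26 then [((v0 :: r').length : Int)] else []) :=
        upIdxs_append (v0 :: r') x
      have hdn : downIdxs (v0 :: r' ++ [x]) =
          downIdxs (v0 :: r') ++ (if x.2 > 26 then [((v0 :: r').length : Int)] else []) :=
        downIdxs_append (v0 :: r') x
      unfold specFd specUbd specDau
      rw [hup, hdn]
      simp only [List.map_append, List.map_cons, List.map_nil, List.foldl_append,
        List.foldl_cons, List.foldl_nil]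
      set n : Int := ((v0 :: r').length : Int) with hn
      set U := upIdxs (v0 :: r') with hUdef
      set D := downIdxs (v0 :: r') with hDdef
      by_cases hu : x.2 < -26
      · -- up frame
        have h26 : ¬ (x.2 > 26) := by omega
        rw [if_pos hu, if_neg h26, List.append_nil]
        simp only [jstep, if_pos hu]
        rcases U with _ | ⟨fu, U'⟩
        · have hfind : D.find? (fun i => decide (i > n)) = none := by
            rw [List.find?_eq_none]; intro a ha
            simpa using Int.not_lt.2 (le_of_lt (hD a ha))
          have hz : D.countP (fun i => decide (n < i)) = 0 := by
            rw [List.countP_eq_zero]; intro a ha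
            simpa using Int.not_lt.2 (le_of_lt (hD a ha))
          simp [hfind, hz, ite_max, ite_min]
        · rcases hfd : D.find? (fun i => decide (i > fu)) with _ | fdau
          · simp [hfd, ite_max, ite_min]
          · have hmem := List.mem_of_find?_eq_some hfd
            have hne : ¬ (n < fdau) := Int.not_lt.2 (le_of_lt (hD _ hmem))
            simp [hfd, List.countP_cons, List.countP_append, hne, ite_max, ite_min]
      · by_cases hd : x.2 > 26
        · -- down frame
          rw [if_neg hu, if_pos hd, List.append_nil]
          simp only [jstep, if_neg hu, if_pos hd]
          rcases U with _ | ⟨fu, U'⟩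
          · simp [ite_max, ite_min]
          · have hfun : fu < n := hU _ List.mem_cons_self
            rcases hfd : D.find? (fun i => decide (i > fu)) with _ | fdau
            · have hcnt : (fu :: U').countP (fun i => decide (i < n)) = (fu :: U').length := by
                rw [List.countP_eq_length]; intro a ha
                simpa using hU a ha
              simp [hfd, List.find?_append, hfun, hcnt, ite_max, ite_min]
            · simp [hfd, List.find?_append, List.countP_append, hfun, ite_max, ite_min]
        · -- neither frame
          rw [if_neg hu, if_neg hd]
          simp only [jstep, if_neg hu, if_neg hd, List.append_nil]
          rcases U with _ | ⟨fu, U'⟩ <;> simp [ite_max, ite_min]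

theorem main (vels : List (Int × Int)) : detect_jump_py vels = detect_jump_py_alt vels := by
  rcases vels with _ | ⟨v0, rest⟩
  · rfl
  · rw [detect_jump_py, detect_jump_py_alt]
    by_cases hlen : (v0 :: rest).length < 8
    · simp only [if_pos hlen]
    · simp only [if_neg hlen]
      rw [jfold_spec]
      by_cases h3 : (upIdxs (v0 :: rest)).length < 3 ∨ (downIdxs (v0 :: rest)).length < 3
      · rcases h3 with h | h <;>
          · rw [if_pos (by simp [h])]
            simp [Nat.not_le.2 h]
      · push Not at h3
        obtain ⟨h3u, h3d⟩ := h3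
        obtain ⟨fu, U', hU⟩ : ∃ fu U', upIdxs (v0 :: rest) = fu :: U' := by
          rcases h : upIdxs (v0 :: rest) with _ | ⟨a, b⟩
          · rw [h] at h3u; simp at h3u
          · exact ⟨a, b, rfl⟩
        rw [if_neg (by simp [Nat.not_lt.2 h3u, Nat.not_lt.2 h3d])]
        rw [hU]
        simp only [List.head?_cons]
        rw [hU] at h3u
        split
        · -- find? = none
          rename_i hF
          have hfd : specFd (v0 :: rest) = false := by
            simp only [specFd, hU, List.head?_cons, hF, Option.isSome_none]
          simp [hfd]
        · -- find? = some fdau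
          rename_i fdau hF
          have hfd : specFd (v0 :: rest) = true := by
            simp only [specFd, hU, List.head?_cons, hF, Option.isSome_some]
          have hubd : specUbd (v0 :: rest) = (fu :: U').countP (fun i => decide (i < fdau)) := by
            simp only [specUbd, hU, List.head?_cons, hF]
          have hdau : specDau (v0 :: rest) =
              (downIdxs (v0 :: rest)).countP (fun i => decide (i > fu)) := by
            simp only [specDau, hU, List.head?_cons]
          rw [hfd, hubd, hdau]
          by_cases h2 : (fu :: U').countP (fun i => decide (i < fdau)) < 2
          · rw [if_pos (by simp [h2])]
            simp [Nat.not_le.2 h2]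
          · by_cases hd3 : (downIdxs (v0 :: rest)).countP (fun i => decide (i > fu)) < 3
            · rw [if_pos (by simp [hd3])]
              simp [Nat.not_le.2 hd3]
            · rw [if_neg (by simp only [Bool.or_eq_true, decide_eq_true_eq]; push Not; exact ⟨Nat.not_lt.1 h2, Nat.not_lt.1 hd3⟩)]
              split
              · rename_i mx mn hmx hmn
                rw [List.map_cons, PySem.List.max?_id_cons] at hmx
                rw [List.map_cons, PySem.List.min?_id_cons] at hmn
                obtain rfl := Option.some.inj hmx
                obtain rfl := Option.some.inj hmn
                simp only [List.map_cons, List.foldl_cons, max_self, min_self]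
                have h3u' : 2 ≤ U'.length := by simpa using h3u
                simp [h3u', h3d, Nat.not_lt.1 h2, Nat.not_lt.1 hd3]
                by_cases h55 : List.foldl max v0.2 (List.map (fun x => x.2) rest) -
                    List.foldl min v0.2 (List.map (fun x => x.2) rest) < 55
                · simp [h55, Int.not_le.2 h55]
                · simp [h55, Int.not_lt.1 h55]
              · rename_i hbad
                exfalso
                exact hbad (((v0 :: rest).map (·.2)).tail.foldl max v0.2)
                  (((v0 :: rest).map (·.2)).tail.foldl min v0.2)
                  (by rw [List.map_cons, PySem.List.max?_id_cons]; rfl)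
                  (by rw [List.map_cons, PySem.List.min?_id_cons]; rfl)

-- ===== VERDICT (by name: the statement is the Claim_ definition above) =====
theorem detect_jump_py_spec : Claim_equal_detect_jump_py := by
  intro vels _
  exact main vels
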